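-- pv_equiv track=rewrite | github.com/coder2hacker/Explore-open-source | Advent_of_Code_2015_Python/Day_5/Day_5.py | is_naughty_or_nice
-- ===== SOURCE A (Python) =====
-- def is_naughty_or_nice(input_data):
--     input_data = input_data.split("\n")
--
--     def nice_string(s):
--
--         # Criteria 1
--         def vowel_count_criteria():
--             vowel_count = 0
--             for i in s:
--                 if i in ("aeiou"):
--                     vowel_count += 1
--             if vowel_count >= 3:
--                 return True
--             return False
--
--         # Criteria 2
--         def appear_twice():
--             for index in range(len(s) + 1):
--                 if index + 1 < len(s) and s[index] == s[index + 1]: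
--                     return True
--             return False
--
--         # Criteria 3
--         def exclusions():
--             return "ab" in s or "cd" in s or "pq" in s or "xy" in s
--
--         return vowel_count_criteria() and appear_twice() and not exclusions()
--
--     return len(list(filter(lambda data: nice_string(data), input_data)))
-- ===== SOURCE B (Python) =====
-- def is_naughty_or_nice(input_data):
--     # Single streaming pass over the raw characters: no split, no per-line rescans.
--     # A 5-field state machine; each newline flushes the current line's verdict.
--     count = 0
--     vowels, double, bad, prev = 0, False, False, None
--     for c in input_data:
--         if c == "\n":
--             if vowels >= 3 and double and not bad:
--                 count += 1
--             vowels, double, bad, prev = 0, False, False, None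
--         else:
--             if c in "aeiou":
--                 vowels += 1
--             if prev == c:
--                 double = True
--             if prev is not None and prev + c in ("ab", "cd", "pq", "xy"):
--                 bad = True
--             prev = c
--     if vowels >= 3 and double and not bad:
--         count += 1
--     return count
-- ===== Notes on version B (the rewrite author's own statement) =====
-- stated objective: alternative
-- what changed: B replaces A's split-into-lines plus three separate per-line scanning helpers (vowel counter loop, index loop over adjacent pairs, four substring tests) by a single streaming pass over the raw input characters with a five-field state machine (count, vowel count, double-seen, bad-pair-seen, previous char) that flushes a line's verdict whenever a newline is consumed, so no line list is ever built and each character is examined exactly once.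
import Mathlib
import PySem

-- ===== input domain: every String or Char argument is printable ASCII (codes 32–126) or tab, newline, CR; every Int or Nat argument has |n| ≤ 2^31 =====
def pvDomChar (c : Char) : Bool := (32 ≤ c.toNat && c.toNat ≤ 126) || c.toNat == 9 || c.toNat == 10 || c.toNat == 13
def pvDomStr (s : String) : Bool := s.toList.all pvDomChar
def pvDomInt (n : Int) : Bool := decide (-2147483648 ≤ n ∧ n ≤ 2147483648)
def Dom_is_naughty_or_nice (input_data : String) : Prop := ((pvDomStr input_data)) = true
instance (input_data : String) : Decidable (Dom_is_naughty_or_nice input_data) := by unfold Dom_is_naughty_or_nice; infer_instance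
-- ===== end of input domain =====

-- B replaces A's split-into-lines + three per-line scanning helpers by a single streaming
-- pass: a five-field state machine over the raw characters, flushed at each newline.

-- ===== PORT A =====
-- Criteria 1: explicit counter loop; `i in "aeiou"` on a 1-char string = membership
def pvVowelA (cs : List Char) : Bool :=
  decide (3 ≤ cs.foldl (fun acc c => if "aeiou".toList.contains c then acc + 1 else acc) (0 : Int))

-- Criteria 2: for index in range(len(s)+1) with early return = any over the range
def pvTwiceA (cs : List Char) : Bool :=
  (PySem.List.pyRange 0 ((cs.length : Int) + 1) 1).any (fun i =>
    decide (i + 1 < (cs.length : Int)) && (PySem.List.pyGet? cs i == PySem.List.pyGet? cs (i + 1)))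

-- Criteria 3: Python substring tests
def pvExclA (cs : List Char) : Bool :=
  PySem.Chars.isIn "ab".toList cs || PySem.Chars.isIn "cd".toList cs ||
  PySem.Chars.isIn "pq".toList cs || PySem.Chars.isIn "xy".toList cs

def pvNiceA (cs : List Char) : Bool := pvVowelA cs && pvTwiceA cs && !pvExclA cs

def is_naughty_or_nice (input_data : String) : Int :=
  ((PySem.Chars.splitOn input_data.toList "\n".toList).filter (fun l => pvNiceA l)).length

-- ===== PORT B =====
-- `prev is not None and prev + c in ("ab","cd","pq","xy")` : the 2-char string prev+c is
-- one of the four literals iff the pair (prev, c) is in the pair list (exact).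
def pvBadPair (prev : Option Char) (c : Char) : Bool :=
  match prev with
  | none => false
  | some a => [('a','b'), ('c','d'), ('p','q'), ('x','y')].contains (a, c)

-- loop body of B: state = (count, vowels, double, bad, prev)
def pvStepB (st : Int × Int × Bool × Bool × Option Char) (c : Char) :
    Int × Int × Bool × Bool × Option Char :=
  match st with
  | (cnt, v, dbl, bad, prev) =>
    if c = '\n' then
      ((if decide (3 ≤ v) && dbl && !bad then cnt + 1 else cnt), 0, false, false, none)
    else
      (cnt, v + (if "aeiou".toList.contains c then 1 else 0),
       dbl || (prev == some c), bad || pvBadPair prev c, some c)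

def is_naughty_or_nice_alt (input_data : String) : Int :=
  match input_data.toList.foldl pvStepB (0, 0, false, false, none) with
  | (cnt, v, dbl, bad, _) => if decide (3 ≤ v) && dbl && !bad then cnt + 1 else cnt

-- ===== PRECONDITION & SPEC =====
def Spec_is_naughty_or_nice (input_data : String) (out : Int) : Prop := out = is_naughty_or_nice_alt input_data
instance (input_data : String) (out : Int) : Decidable (Spec_is_naughty_or_nice input_data out) := by unfold Spec_is_naughty_or_nice; infer_instance

-- ===== CLAIM (what is proved, stated in full; the proofs are below) =====
def Claim_equal_is_naughty_or_nice : Prop := ∀ (input_data : String), Dom_is_naughty_or_nice input_data → Spec_is_naughty_or_nice input_data (is_naughty_or_nice input_data)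

-- ===== LEMMAS AND PROOFS =====

-- simple recursive characterization of splitting on a single '\n'
def pvPre (p : List Char) : List (List Char) → List (List Char)
  | [] => [p]
  | x :: xs => (p ++ x) :: xs

def pvSplit : List Char → List (List Char)
  | [] => [[]]
  | c :: rest => if c = '\n' then [] :: pvSplit rest else pvPre [c] (pvSplit rest)

lemma pvPre_ne_nil (p : List Char) (m : List (List Char)) : pvPre p m ≠ [] := by
  cases m <;> simp [pvPre]

lemma pvSplit_ne_nil (l : List Char) : pvSplit l ≠ [] := by
  cases l with
  | nil => simp [pvSplit]
  | cons c rest =>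
    simp only [pvSplit]
    split_ifs
    · simp
    · exact pvPre_ne_nil _ _

lemma pvSplit_newline (rest : List Char) : pvSplit ('\n' :: rest) = [] :: pvSplit rest := by
  rw [pvSplit, if_pos rfl]

lemma pvPre_nil (m : List (List Char)) (h : m ≠ []) : pvPre [] m = m := by
  cases m with
  | nil => exact absurd rfl h
  | cons x xs => simp [pvPre]

lemma pvPre_pvPre (p q : List Char) (m : List (List Char)) :
    pvPre p (pvPre q m) = pvPre (p ++ q) m := by
  cases m <;> simp [pvPre]

lemma pvGo_eq (fuel : Nat) (l cur : List Char) (acc : List (List Char)) (h : l.length ≤ fuel) :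
    PySem.Chars.splitOn.go ['\n'] fuel l cur acc
      = acc.reverse ++ pvPre cur.reverse (pvSplit l) := by
  induction fuel generalizing l cur acc with
  | zero =>
    have : l = [] := List.eq_nil_of_length_eq_zero (Nat.le_zero.mp h)
    subst this
    simp [PySem.Chars.splitOn.go, pvSplit, pvPre]
  | succ fuel ih =>
    cases l with
    | nil => simp [PySem.Chars.splitOn.go, pvSplit, pvPre]
    | cons c rest =>
      by_cases hc : c = '\n'
      · subst hc
        have hpre : List.isPrefixOf ['\n'] ('\n' :: rest) = true := by
          simp [List.isPrefixOf]
        rw [PySem.Chars.splitOn.go]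
        simp only [hpre, if_true, List.length_cons, List.length_nil, List.drop_succ_cons,
          List.drop_zero]
        rw [ih rest [] (cur.reverse :: acc) (by simpa using Nat.le_of_succ_le_succ h)]
        rw [pvSplit_newline]
        simp only [List.reverse_nil]
        rw [pvPre_nil _ (pvSplit_ne_nil rest)]
        simp [pvPre]
      · have hpre : List.isPrefixOf ['\n'] (c :: rest) = false := by
          simp [List.isPrefixOf]; exact fun h' => hc h'.symm
        rw [PySem.Chars.splitOn.go]
        simp only [hpre]
        rw [if_neg (by simp)]
        rw [ih rest (c :: cur) acc (by simpa using Nat.le_of_succ_le_succ h)]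
        simp [pvSplit, hc, pvPre_pvPre]

lemma pvSplitOn_eq (cs : List Char) :
    PySem.Chars.splitOn cs ['\n'] = pvSplit cs := by
  unfold PySem.Chars.splitOn
  rw [pvGo_eq cs.length.succ cs [] [] (Nat.le_succ _)]
  simp [pvPre_nil _ (pvSplit_ne_nil cs)]

-- the per-line part of B's state and its characterization
def pvLineStep (st : Int × Bool × Bool × Option Char) (c : Char) :
    Int × Bool × Bool × Option Char :=
  match st with
  | (v, dbl, bad, prev) =>
    (v + (if "aeiou".toList.contains c then 1 else 0),
     dbl || (prev == some c), bad || pvBadPair prev c, some c)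

def pvLS (p : List Char) : Int × Bool × Bool × Option Char :=
  p.foldl pvLineStep (0, false, false, none)

def pvPairs (p : List Char) : List (Char × Char) := p.zip p.tail

lemma pvPairs_append (p : List Char) (c : Char) :
    pvPairs (p ++ [c])
      = pvPairs p ++ (match p.getLast? with | none => [] | some a => [(a, c)]) := by
  induction p with
  | nil => simp [pvPairs]
  | cons a q ih =>
    cases q with
    | nil => simp [pvPairs]
    | cons b r =>
      simp only [pvPairs, List.cons_append, List.zip_cons_cons, List.tail_cons] at ih ⊢
      simp only [List.getLast?_cons_cons]
      exact congrArg (List.cons (a, b)) ih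

lemma pvLS_char (p : List Char) :
    pvLS p = ((p.countP (fun c => "aeiou".toList.contains c) : Int),
      (pvPairs p).any (fun x => x.1 == x.2),
      (pvPairs p).any (fun x => [('a','b'), ('c','d'), ('p','q'), ('x','y')].contains x),
      p.getLast?) := by
  induction p using List.reverseRecOn with
  | nil => simp [pvLS, pvPairs]
  | append_singleton p c ih =>
    have hstep : pvLS (p ++ [c]) = pvLineStep (pvLS p) c := by
      simp [pvLS, List.foldl_append]
    rw [hstep, ih]
    simp only [pvLineStep, pvPairs_append, List.any_append, List.countP_append,
      List.getLast?_concat]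
    cases hl : p.getLast? with
    | none => simp [pvBadPair, List.countP_cons, List.countP_nil]
    | some a => simp [pvBadPair, List.countP_cons, List.countP_nil]

def pvNiceS (st : Int × Bool × Bool × Option Char) : Bool :=
  decide (3 ≤ st.1) && st.2.1 && !st.2.2.1

-- A's three checks in pairs/countP form (bridging A's scans to B's state)
lemma pvVowel_eq (cs : List Char) :
    pvVowelA cs = decide (3 ≤ cs.countP (fun c => "aeiou".toList.contains c)) := by
  unfold pvVowelA
  rw [PySem.List.foldl_if_add_one]
  simp only [zero_add, decide_eq_decide]
  exact_mod_cast Iff.rfl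

lemma pvMem_zip_tail_iff (cs : List Char) (a b : Char) :
    (a, b) ∈ cs.zip cs.tail ↔ [a, b] <:+: cs := by
  induction cs with
  | nil => simp
  | cons c rest ih =>
    cases rest with
    | nil =>
      simp [List.infix_cons_iff, List.cons_prefix_cons]
    | cons d rest2 =>
      rw [List.infix_cons_iff, ← ih]
      constructor
      · intro h
        rcases List.mem_cons.mp h with h | h
        · left
          obtain ⟨h1, h2⟩ := Prod.mk.injEq .. ▸ h
          simp_all [List.cons_prefix_cons]
        · right; exact h
      · rintro (h | h)
        · rw [List.cons_prefix_cons] at h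
          obtain ⟨rfl, h⟩ := h
          rw [List.cons_prefix_cons] at h
          obtain ⟨rfl, -⟩ := h
          exact List.mem_cons_self
        · exact List.mem_cons_of_mem _ h

lemma pvTwice_eq (cs : List Char) :
    pvTwiceA cs = (cs.zip cs.tail).any (fun p => p.1 == p.2) := by
  rw [Bool.eq_iff_iff]
  simp only [pvTwiceA, List.any_eq_true, Bool.and_eq_true, decide_eq_true_eq, beq_iff_eq]
  constructor
  · rintro ⟨i, hmem, hlt, heq⟩
    rw [PySem.List.mem_pyRange_iff_of_pos (by norm_num)] at hmem
    obtain ⟨h0, -, -⟩ := hmem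
    obtain ⟨n, rfl⟩ := Int.eq_ofNat_of_zero_le h0
    have hn : n + 1 < cs.length := by exact_mod_cast hlt
    refine ⟨(cs[n], cs.tail[n]'(by simp [List.length_tail]; omega)), ?_, ?_⟩
    · exact List.mem_iff_getElem.mpr ⟨n, by simp [List.length_tail]; omega, by rw [List.getElem_zip]⟩
    · have h1 : PySem.List.pyGet? cs (n : Int) = cs[n]? := PySem.List.pyGet?_natCast cs n
      have h2 : PySem.List.pyGet? cs ((n : Int) + 1) = cs[n + 1]? := by
        exact_mod_cast PySem.List.pyGet?_natCast cs (n + 1)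
      rw [h1, h2] at heq
      simp only [List.getElem?_eq_getElem (by omega : n < cs.length),
        List.getElem?_eq_getElem hn, Option.some_inj] at heq
      simpa [List.getElem_tail] using heq
  · rintro ⟨p, hmem, heq⟩
    obtain ⟨n, hn, hp⟩ := List.mem_iff_getElem.mp hmem
    have hlen : n + 1 < cs.length := by
      simp [List.length_zip, List.length_tail] at hn; omega
    refine ⟨(n : Int), ?_, by exact_mod_cast hlen, ?_⟩
    · rw [PySem.List.mem_pyRange_iff_of_pos (by norm_num)]
      refine ⟨by positivity, by exact_mod_cast Nat.lt_succ_of_lt (by omega : n < cs.length), ⟨(n : Int), by ring⟩⟩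
    · rw [List.getElem_zip] at hp
      have h1 : PySem.List.pyGet? cs (n : Int) = cs[n]? := PySem.List.pyGet?_natCast cs n
      have h2 : PySem.List.pyGet? cs ((n : Int) + 1) = cs[n + 1]? := by
        exact_mod_cast PySem.List.pyGet?_natCast cs (n + 1)
      rw [h1, h2, List.getElem?_eq_getElem (by omega : n < cs.length),
        List.getElem?_eq_getElem hlen, Option.some_inj]
      have := hp ▸ heq
      simpa [List.getElem_tail] using this

lemma pvExcl_eq (cs : List Char) :
    pvExclA cs = (cs.zip cs.tail).any (fun p => [('a','b'), ('c','d'), ('p','q'), ('x','y')].contains p) := by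
  rw [Bool.eq_iff_iff]
  simp only [pvExclA, Bool.or_eq_true, PySem.Chars.isIn_iff_infix, List.any_eq_true,
    List.contains_eq_mem, decide_eq_true_eq, List.mem_cons, List.not_mem_nil, or_false]
  constructor
  · rintro (((h | h) | h) | h)
    · exact ⟨('a','b'), (pvMem_zip_tail_iff cs _ _).mpr (by simpa using h), by simp⟩
    · exact ⟨('c','d'), (pvMem_zip_tail_iff cs _ _).mpr (by simpa using h), by simp⟩
    · exact ⟨('p','q'), (pvMem_zip_tail_iff cs _ _).mpr (by simpa using h), by simp⟩
    · exact ⟨('x','y'), (pvMem_zip_tail_iff cs _ _).mpr (by simpa using h), by simp⟩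
  · rintro ⟨p, hmem, (rfl | rfl | rfl | rfl)⟩
    · exact Or.inl (Or.inl (Or.inl (by simpa using (pvMem_zip_tail_iff cs _ _).mp hmem)))
    · exact Or.inl (Or.inl (Or.inr (by simpa using (pvMem_zip_tail_iff cs _ _).mp hmem)))
    · exact Or.inl (Or.inr (by simpa using (pvMem_zip_tail_iff cs _ _).mp hmem))
    · exact Or.inr (by simpa using (pvMem_zip_tail_iff cs _ _).mp hmem)

lemma pvNiceS_eq (p : List Char) : pvNiceS (pvLS p) = pvNiceA p := by
  rw [pvLS_char]
  simp only [pvNiceS, pvNiceA, pvVowel_eq, pvTwice_eq, pvExcl_eq, pvPairs]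
  congr 1
  · congr 1
    simp only [decide_eq_decide]
    exact_mod_cast Iff.rfl

def pvFinish (st : Int × Int × Bool × Bool × Option Char) : Int :=
  if pvNiceS st.2 then st.1 + 1 else st.1

lemma pvStepB_newline (cnt : Int) (st : Int × Bool × Bool × Option Char) :
    pvStepB (cnt, st) '\n' = ((if pvNiceS st then cnt + 1 else cnt), (0, false, false, none)) := by
  obtain ⟨v, dbl, bad, prev⟩ := st
  simp [pvStepB, pvNiceS]

lemma pvStepB_other (cnt : Int) (st : Int × Bool × Bool × Option Char) (c : Char)
    (hc : c ≠ '\n') : pvStepB (cnt, st) c = (cnt, pvLineStep st c) := by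
  obtain ⟨v, dbl, bad, prev⟩ := st
  simp [pvStepB, pvLineStep, hc]

lemma pvMain (cs : List Char) : ∀ (cnt : Int) (p : List Char),
    pvFinish (cs.foldl pvStepB (cnt, pvLS p))
      = cnt + (((pvPre p (pvSplit cs)).filter (fun l => pvNiceA l)).length : Int) := by
  induction cs with
  | nil =>
    intro cnt p
    simp only [List.foldl_nil, pvFinish, pvSplit, pvPre, List.filter]
    rw [pvNiceS_eq]
    cases h : pvNiceA p <;> simp [h]
  | cons c cs ih =>
    intro cnt p
    by_cases hc : c = '\n'
    · subst hc
      rw [List.foldl_cons, pvStepB_newline,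
        show ((0 : Int), false, false, (none : Option Char)) = pvLS [] from rfl, ih]
      rw [pvPre_nil _ (pvSplit_ne_nil cs), pvSplit_newline]
      simp only [pvPre, pvNiceS_eq]
      cases h : pvNiceA p <;> simp [h] <;> try ring
    · rw [List.foldl_cons, pvStepB_other _ _ _ hc,
        show pvLineStep (pvLS p) c = pvLS (p ++ [c]) by simp [pvLS, List.foldl_append], ih]
      simp [pvSplit, hc, pvPre_pvPre]

-- ===== VERDICT (by name: the statement is the Claim_ definition above) =====
theorem is_naughty_or_nice_spec : Claim_equal_is_naughty_or_nice := by
  intro input_data _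
  show is_naughty_or_nice input_data = is_naughty_or_nice_alt input_data
  have halt : is_naughty_or_nice_alt input_data
      = pvFinish (input_data.toList.foldl pvStepB (0, pvLS [])) := by
    simp only [is_naughty_or_nice_alt, pvFinish, pvNiceS, pvLS, List.foldl_nil]
    rfl
  rw [halt, pvMain input_data.toList 0 []]
  rw [pvPre_nil _ (pvSplit_ne_nil input_data.toList)]
  simp [is_naughty_or_nice, pvSplitOn_eq]
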